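-- pv_equiv track=rewrite | github.com/yashhashhrrreee/6Companies30Days | Adobe/03  K-th Smallest in Lexicographical Order.py | bincount
-- ===== SOURCE A (Python) =====
-- def bincount(n,r):
--     A = [0]*r
--     s = 1
--     while n>0:
--         for i in range(r):
--             s     = min(n,s)
--             A[i] += s
--             n    -= s
--             if n<=0:
--                 break
--         s *= 10
--     return A
-- ===== SOURCE B (Python) =====
-- def bincount(n, r):
--     if n <= 0 or r <= 0:
--         return [0] * r
--     s, base = 1, 0
--     while n > r * s:
--         base += s
--         n -= r * s
--         s *= 10
--     q, rem = divmod(n, s)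
--     tail = r - q - (1 if rem else 0)
--     return [base + s] * q + ([base + rem] if rem else []) + [base] * tail
-- ===== Notes on version B (the rewrite author's own statement) =====
-- stated objective: faster
-- what changed: A fills the r buckets one by one in every power-of-ten round (inner loop over all r buckets per round); B collapses each full round into a scalar base increment and computes the final round's split in closed form with one divmod, so only the output list itself is built bucket-by-bucket.
-- outside the precondition, e.g. on bincount(5, 0): A does not finish within the time limit, B returns []
import Mathlib
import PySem

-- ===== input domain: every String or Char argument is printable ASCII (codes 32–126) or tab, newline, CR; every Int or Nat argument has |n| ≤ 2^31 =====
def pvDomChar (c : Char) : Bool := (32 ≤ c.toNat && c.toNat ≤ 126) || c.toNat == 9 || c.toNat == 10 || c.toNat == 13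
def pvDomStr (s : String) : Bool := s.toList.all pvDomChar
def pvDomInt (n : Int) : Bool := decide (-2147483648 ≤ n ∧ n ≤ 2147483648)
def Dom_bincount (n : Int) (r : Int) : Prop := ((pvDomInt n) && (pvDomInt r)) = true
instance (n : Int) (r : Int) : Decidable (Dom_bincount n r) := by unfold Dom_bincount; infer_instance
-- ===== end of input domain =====

-- B replaces A's per-bucket inner loop in every round by a constant amount of work per round
-- (full rounds add a uniform base; the final round is a closed-form split): objective = faster.
-- A diverges (infinite while loop) when n > 0 and r <= 0; Pre_ excludes exactly those inputs.


-- ===== PORT A =====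
-- inner `for i in range(r)` loop: state (A, s, n), early `break` when n ≤ 0
def bcInner : List Int → List Int → Int → Int → (List Int × Int × Int)
  | [], A, s, n => (A, s, n)
  | i :: rest, A, s, n =>
    let s' := min n s
    let A' := A.modify i.toNat (· + s')
    let n' := n - s'
    if n' ≤ 0 then (A', s', n') else bcInner rest A' s' n'

-- outer `while n > 0` loop; the fuel only makes the loop total (n decreases by ≥ 1 per
-- round whenever r ≥ 1, so fuel n.toNat+1 is never exhausted inside Pre_)
def bcOuter (r : Int) : Nat → List Int → Int → Int → List Int
  | 0, A, _, _ => A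
  | fuel + 1, A, s, n =>
    if 0 < n then
      match bcInner (PySem.List.pyRange 0 r 1) A s n with
      | (A', s', n') => bcOuter r fuel A' (s' * 10) n'
    else A

def bincount (n : Int) (r : Int) : List Int :=
  bcOuter r (n.toNat + 1) (List.replicate r.toNat 0) 1 n

-- ===== PORT B =====
-- `while n > r*s` loop of Source B; fuel n.toNat+1 only makes it total (n drops by r*s ≥ 1 per pass)
def altLoop (r : Int) : Nat → Int → Int → Int → (Int × Int × Int)
  | 0, n, s, base => (n, s, base)
  | fuel + 1, n, s, base =>
    if r * s < n then altLoop r fuel (n - r * s) (s * 10) (base + s) else (n, s, base)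

def bincount_alt (n : Int) (r : Int) : List Int :=
  if n ≤ 0 ∨ r ≤ 0 then List.replicate r.toNat 0
  else
    match altLoop r (n.toNat + 1) n 1 0 with
    | (n', s', base) =>
      let q := PySem.Int.floordiv n' s'
      let rem := PySem.Int.mod n' s'
      let tail := r - q - (if rem ≠ 0 then 1 else 0)
      List.replicate q.toNat (base + s') ++ (if rem ≠ 0 then [base + rem] else [])
        ++ List.replicate tail.toNat base

-- ===== PRECONDITION & SPEC =====
-- Pre_ excludes exactly the inputs 0 < n ∧ r ≤ 0, on which A's while-loop never terminates
def Pre_bincount (n : Int) (r : Int) : Prop := 0 < n → 0 < r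
instance (n : Int) (r : Int) : Decidable (Pre_bincount n r) := by unfold Pre_bincount; infer_instance
def pvWitness_bincount : Int × Int := (57, 3)

def Spec_bincount (n : Int) (r : Int) (out : List Int) : Prop := out = bincount_alt n r
instance (n : Int) (r : Int) (out : List Int) : Decidable (Spec_bincount n r out) := by unfold Spec_bincount; infer_instance

-- ===== CLAIM (what is proved, stated in full; the proofs are below) =====
def Claim_equal_bincount : Prop := ∀ (n : Int) (r : Int), Dom_bincount n r → Pre_bincount n r → Spec_bincount n r (bincount n r)

-- ===== LEMMAS AND PROOFS =====

lemma modify_append_cons (l₁ l₂ : List Int) (y : Int) (f : Int → Int) :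
    (l₁ ++ y :: l₂).modify l₁.length f = l₁ ++ f y :: l₂ := by
  simp [List.modify_eq_set_getElem?]

-- a full round: every bucket gets s, the loop falls through (or breaks exactly at the end)
lemma inner_full (s base : Int) (hs : 1 ≤ s) :
    ∀ (k : Nat) (a n : Int), 0 ≤ a → 0 < n → (k : Int) * s ≤ n →
    bcInner (PySem.List.pyRange a (a + k) 1)
        (List.replicate a.toNat (base + s) ++ List.replicate k base) s n
      = (List.replicate (a.toNat + k) (base + s), s, n - k * s) := by
  intro k
  induction k with
  | zero =>
    intro a n _ _ _
    simp [PySem.List.pyRange_one_eq_nil (le_refl a), bcInner]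
  | succ k ih =>
    intro a n ha hn hks
    have hk1 : ((k + 1 : Nat) : Int) = (k : Int) + 1 := by push_cast; omega
    rw [hk1] at hks ⊢
    have hsn : s ≤ n := by nlinarith [Int.natCast_nonneg k]
    have hb : a + ((k : Int) + 1) = (a + 1) + (k : Int) := by omega
    have hrange : PySem.List.pyRange a (a + ((k : Nat) + 1)) 1
        = a :: PySem.List.pyRange (a + 1) ((a + 1) + (k : Nat)) 1 := by
      rw [hb, PySem.List.pyRange_one_cons (by omega)]
    rw [hrange]
    have hmod : (List.replicate a.toNat (base + s) ++ List.replicate (k + 1) base).modify a.toNat (· + s)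
        = List.replicate (a.toNat + 1) (base + s) ++ List.replicate k base := by
      rw [List.replicate_succ]
      have := modify_append_cons (List.replicate a.toNat (base + s)) (List.replicate k base) base (· + s)
      simp only [List.length_replicate] at this
      rw [this]
      simp [List.replicate_succ']
    simp only [bcInner, min_eq_right hsn, hmod]
    by_cases hbreak : n - s ≤ 0
    · have hns : n = s := le_antisymm (by omega) hsn
      have hk0 : k = 0 := by
        by_contra h
        have : (1 : Int) ≤ (k : Int) := by exact_mod_cast Nat.one_le_iff_ne_zero.mpr h
        nlinarith
      subst hk0 hns
      simp
    · rw [if_neg hbreak]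
      have ha1 : (a + 1).toNat = a.toNat + 1 := by omega
      have := ih (a + 1) (n - s) (by omega) (by omega) (by linarith)
      rw [ha1] at this
      rw [this, show (a.toNat + 1) + k = a.toNat + (k + 1) from by omega,
        show n - s - (k : Int) * s = n - ((k : Int) + 1) * s from by ring]

-- the final round: q full buckets of s, one bucket of rem, the loop breaks with n = 0
lemma inner_final (s base : Int) (hs : 1 ≤ s) :
    ∀ (k : Nat) (a n q rem : Int), 0 ≤ a → 0 < n → n = q * s + rem → 0 ≤ q → 0 ≤ rem → rem < s →
      n < (k : Int) * s →
    ∃ t, bcInner (PySem.List.pyRange a (a + k) 1)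
        (List.replicate a.toNat (base + s) ++ List.replicate k base) s n
      = (List.replicate (a.toNat + q.toNat) (base + s)
          ++ (if rem = 0 then [] else [base + rem])
          ++ List.replicate (k - q.toNat - (if rem = 0 then 0 else 1)) base, t, 0) := by
  intro k
  induction k with
  | zero =>
    intro a n q rem _ hn _ _ _ _ hlt
    simp only [Nat.cast_zero, zero_mul] at hlt
    omega
  | succ k ih =>
    intro a n q rem ha hn hqr hq hrem hrs hlt
    have hk1 : ((k + 1 : Nat) : Int) = (k : Int) + 1 := by push_cast; omega
    rw [hk1] at hlt ⊢
    have hb : a + ((k : Int) + 1) = (a + 1) + (k : Int) := by omega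
    have hrange : PySem.List.pyRange a (a + ((k : Nat) + 1)) 1
        = a :: PySem.List.pyRange (a + 1) ((a + 1) + (k : Nat)) 1 := by
      rw [hb, PySem.List.pyRange_one_cons (by omega)]
    rw [hrange]
    by_cases hns : n < s
    · -- last bucket: gets all of n, q = 0, rem = n
      have hq0 : q = 0 := by
        by_contra h
        have h1 : 1 ≤ q := by omega
        have h2 : s ≤ q * s := le_mul_of_one_le_left (by omega) h1
        omega
      have hremn : rem = n := by
        rw [hq0, zero_mul] at hqr
        omega
      have hmod : (List.replicate a.toNat (base + s) ++ List.replicate (k + 1) base).modify a.toNat (· + n)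
          = List.replicate a.toNat (base + s) ++ (base + n) :: List.replicate k base := by
        rw [List.replicate_succ]
        have := modify_append_cons (List.replicate a.toNat (base + s)) (List.replicate k base) base (· + n)
        simp only [List.length_replicate] at this
        rw [this]
      refine ⟨n, ?_⟩
      simp only [bcInner, min_eq_left (le_of_lt hns), hmod]
      rw [if_pos (by omega)]
      rw [hq0, hremn]
      simp [show ¬ (n = 0) from by omega]
    · have hsn : s ≤ n := by omega
      have hq1 : 1 ≤ q := by
        by_contra h
        have h0 : q = 0 := by omega
        rw [h0, zero_mul] at hqr
        omega
      have hmod : (List.replicate a.toNat (base + s) ++ List.replicate (k + 1) base).modify a.toNat (· + s)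
          = List.replicate (a.toNat + 1) (base + s) ++ List.replicate k base := by
        rw [List.replicate_succ]
        have := modify_append_cons (List.replicate a.toNat (base + s)) (List.replicate k base) base (· + s)
        simp only [List.length_replicate] at this
        rw [this]
        simp [List.replicate_succ']
      simp only [bcInner, min_eq_right hsn, hmod]
      by_cases hbreak : n - s ≤ 0
      · -- n = s exactly : q = 1, rem = 0
        have hns' : n = s := by omega
        have hq1' : q = 1 := by
          by_contra h
          have h2 : 2 ≤ q := by omega
          have h3 : 2 * s ≤ q * s := mul_le_mul_of_nonneg_right h2 (by omega)
          omega
        have hrem0 : rem = 0 := by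
          rw [hq1', one_mul] at hqr
          omega
        refine ⟨s, ?_⟩
        rw [if_pos (by omega)]
        rw [hq1', hrem0]
        simp [hns']
      · rw [if_neg hbreak]
        have ha1 : (a + 1).toNat = a.toNat + 1 := by omega
        obtain ⟨t, ht⟩ := ih (a + 1) (n - s) (q - 1) rem (by omega) (by omega)
          (by rw [hqr]; ring) (by omega) hrem hrs (by linarith)
        rw [ha1] at ht
        refine ⟨t, ?_⟩
        rw [ht, show (a.toNat + 1) + (q - 1).toNat = a.toNat + q.toNat from by omega,
          show k - (q - 1).toNat - (if rem = 0 then 0 else 1)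
              = k + 1 - q.toNat - (if rem = 0 then 0 else 1) from by
            by_cases h : rem = 0 <;> simp [h] <;> omega]

lemma bcOuter_stop (r : Int) (f : Nat) (A : List Int) (s n : Int) (hn : n ≤ 0) :
    bcOuter r f A s n = A := by
  cases f with
  | zero => rfl
  | succ f =>
    unfold bcOuter
    rw [if_neg (by omega)]

-- main loop correspondence: A's round-by-round array is uniform (replicate r base), and
-- agrees with B's (base, s, n) summary state
lemma outer_eq (r : Int) (hr : 1 ≤ r) :
    ∀ (fA fB : Nat) (n s base : Int), 0 < n → 1 ≤ s → n.toNat < fA → n.toNat < fB →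
    bcOuter r fA (List.replicate r.toNat base) s n =
      (match altLoop r fB n s base with
       | (n', s', b) =>
         List.replicate (PySem.Int.floordiv n' s').toNat (b + s')
           ++ (if PySem.Int.mod n' s' ≠ 0 then [b + PySem.Int.mod n' s'] else [])
           ++ List.replicate (r - PySem.Int.floordiv n' s' - (if PySem.Int.mod n' s' ≠ 0 then 1 else 0)).toNat b) := by
  intro fA
  induction fA with
  | zero => intro fB n s base _ _ h _; omega
  | succ fA ih =>
    intro fB n s base hn hs hfA hfB
    have hrnat : ((r.toNat : Nat) : Int) = r := Int.toNat_of_nonneg (by omega)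
    have hs0 : (0 : Int) < s := by omega
    obtain ⟨fB', rfl⟩ : ∃ g, fB = g + 1 := ⟨fB - 1, by omega⟩
    by_cases hfull : r * s ≤ n
    · -- a full round (possibly ending the loop exactly at n = r*s)
      have hinner := inner_full s base hs r.toNat 0 n (le_refl 0) hn (by rw [hrnat]; exact hfull)
      rw [zero_add, hrnat] at hinner
      simp only [Int.toNat_zero, List.replicate_zero, List.nil_append] at hinner
      simp only [bcOuter, if_pos hn, hinner]
      by_cases hstrict : r * s < n
      · -- loop continues on both sides
        simp only [altLoop, if_pos hstrict]
        have hrs1 : (1 : Int) ≤ r * s := by nlinarith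
        have := ih fB' (n - r * s) (s * 10) (base + s) (by omega) (by omega)
          (by omega) (by omega)
        simpa using this
      · -- n = r*s : A finishes the array, B's while-condition already fails
        have hneq : n = r * s := by omega
        have hnn : n - r * s = 0 := by omega
        rw [hnn, bcOuter_stop r fA _ _ 0 (le_refl 0)]
        simp only [altLoop, if_neg (by omega : ¬ (r * s < n))]
        have hfd : PySem.Int.floordiv n s = r := by
          rw [PySem.Int.floordiv_eq_iff_of_pos hs0]
          exact ⟨hfull, by nlinarith⟩
        have hmd : PySem.Int.mod n s = 0 := by
          have h2 := PySem.Int.floordiv_mul_add_mod n s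
          rw [hfd] at h2
          omega
        rw [hfd, hmd]
        simp
    · -- the final round
      rw [not_le] at hfull
      set q := PySem.Int.floordiv n s with hqdef
      set rem := PySem.Int.mod n s with hremdef
      have hq0 : 0 ≤ q := by
        rw [hqdef, PySem.Int.floordiv_eq_ediv_of_pos hs0]
        exact Int.ediv_nonneg (by omega) (by omega)
      have hrem0 : 0 ≤ rem := PySem.Int.mod_nonneg n hs0
      have hrems : rem < s := PySem.Int.mod_lt n hs0
      have hqr : n = q * s + rem := by
        have h2 := PySem.Int.floordiv_mul_add_mod n s
        rw [← hqdef, ← hremdef] at h2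
        omega
      have hqltr : q < r := by
        rw [hqdef, PySem.Int.floordiv_lt_iff_lt_mul hs0]
        exact hfull
      obtain ⟨t, ht⟩ := inner_final s base hs r.toNat 0 n q rem (le_refl 0) hn hqr hq0 hrem0 hrems
        (by rw [hrnat]; exact hfull)
      rw [zero_add, hrnat] at ht
      simp only [Int.toNat_zero, List.replicate_zero, List.nil_append] at ht
      simp only [bcOuter, if_pos hn, ht]
      rw [bcOuter_stop r fA _ _ 0 (le_refl 0)]
      simp only [altLoop, if_neg (by omega : ¬ (r * s < n)), ← hqdef, ← hremdef]
      have htail : (r - q - (if rem ≠ 0 then 1 else 0)).toNat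
          = r.toNat - q.toNat - (if rem = 0 then 0 else 1) := by
        by_cases h : rem = 0 <;> simp [h] <;> omega
      rw [htail]
      by_cases h : rem = 0 <;> simp [h]

-- ===== VERDICT (by name: the statement is the Claim_ definition above) =====
theorem bincount_spec : Claim_equal_bincount := by
  intro n r _ hpre
  unfold Spec_bincount bincount bincount_alt
  by_cases hn : n ≤ 0
  · rw [bcOuter_stop r _ _ _ n hn, if_pos (Or.inl hn)]
  · rw [not_le] at hn
    have hr : 1 ≤ r := hpre hn
    rw [if_neg (by omega)]
    exact outer_eq r hr (n.toNat + 1) (n.toNat + 1) n 1 0 hn (le_refl 1) (by omega) (by omega)
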